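-- pv_equiv track=rewrite | github.com/LuisRojas42/Superior | Teoria de Comunicaciones y Señales/Convolución De Secuencias/AlgoritmosConvolucion.py | convolucionPeriodica
-- ===== SOURCE A (Python) =====
-- def convolucionPeriodica(Xn, xn0, Hn, hn0):
--     #X(n) es la secuencia periódica
--
--     filas = []
--     result = []
--     nuevasfilas = []
--     convolucion = []
--
--     # Multiplicación término a término
--     # Se almacena en filas para despues sumar cada columna
--     for i in range(len(Xn)):
--         # Se agrega una nueva fila
--         filas.insert(i, [])
--
--         # Se agregan 0s al inicio en caso de ser necesario
--         for j in range(i):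
--             filas[i].insert(j, 0)
--
--         # Se hace la multiplicación término a término
--         for k in range(len(Hn)):
--             mult = Hn[k] * Xn[i]
--             filas[i].insert(k + i, mult)
--
--         # Se agregan 0s al final en caso de ser necesario
--         # Para terminar con una matriz cuadrada
--         for l in range(len(Xn) - i - 1):
--             filas[i].append(0)
--
--     # Se suman las columnas
--     for i in range(len(filas[0])):
--         suma = 0
--         for j in range(len(filas)):
--             suma = suma + filas[j][i]
--
--         result.insert(i, suma)
--
--     # En caso de que el vector resultado no sea exactamente divisible
--     # entre el periodo de X(n), se agregan 0s al final
--     # para que se pueda dividir en bloques de N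
--     if len(result) % len(Xn) != 0:
--         ceros = len(Xn) - len(result) % len(Xn)
--         for i in range(ceros):
--             result.append(0)
--
--     #Se separa la secuencia resultando en bloques de N
--     #Siendo N el periodo de la secuencia periódica X(n)
--     #Y apilando los bloques uno debajo del otro
--     for i in range(int (len(result) / len(Xn))):
--         nuevasfilas.insert(i, [])
--         for j in range (len(Xn)):
--             index = (i * len(Xn)) + j
--             nuevasfilas[i].insert(j, result[index])
--
--     #Se suman las nuevas filas
--     for i in range(len(nuevasfilas[0])):
--         suma = 0
--         for j in range(len(nuevasfilas)):
--             suma = suma + nuevasfilas[j][i]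
--
--         convolucion.insert(i, suma)
--
--
--     #Se calcula el elemento en n=0
--     origen = xn0 + hn0
--     origen = origen % len(Xn)
--
--     return convolucion, origen
-- ===== SOURCE B (Python) =====
-- def convolucionPeriodica(Xn, xn0, Hn, hn0):
--     # Direct O(N*M): fold each linear-convolution product into its slot modulo N,
--     # instead of building the N x (N+M-1) shift matrix and re-blocking it.
--     N = len(Xn)
--     convolucion = [0] * N
--     for i, x in enumerate(Xn):
--         for k, h in enumerate(Hn):
--             convolucion[(i + k) % N] += x * h
--     origen = (xn0 + hn0) % N
--     return convolucion, origen
-- ===== Notes on version B (the rewrite author's own statement) =====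
-- stated objective: faster
-- what changed: Instead of materialising the N x (N+M-1) shift matrix, summing its columns, zero-padding and re-blocking into rows of N, B accumulates each product Xn[i]*Hn[k] directly into output slot (i+k) % N in one doubly-nested loop.
import Mathlib
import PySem

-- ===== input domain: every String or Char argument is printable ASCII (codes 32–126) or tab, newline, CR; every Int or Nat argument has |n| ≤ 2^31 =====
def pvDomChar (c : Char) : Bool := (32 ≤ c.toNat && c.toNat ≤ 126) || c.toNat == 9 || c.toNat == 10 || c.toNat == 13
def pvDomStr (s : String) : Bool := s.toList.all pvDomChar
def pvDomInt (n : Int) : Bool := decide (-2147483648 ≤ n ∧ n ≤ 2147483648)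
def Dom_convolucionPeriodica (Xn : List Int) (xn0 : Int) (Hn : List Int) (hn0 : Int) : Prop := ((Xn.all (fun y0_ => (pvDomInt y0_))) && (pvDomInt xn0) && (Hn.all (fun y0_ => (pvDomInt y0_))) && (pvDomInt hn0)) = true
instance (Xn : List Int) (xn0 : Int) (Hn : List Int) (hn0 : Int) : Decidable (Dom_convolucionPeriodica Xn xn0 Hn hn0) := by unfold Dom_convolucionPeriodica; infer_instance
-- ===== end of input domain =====

-- B replaces A's shift-matrix construction, column sums, zero padding and re-blocking by a single
-- doubly-nested accumulation of each product Xn[i]*Hn[k] into output slot (i+k) % N (asymptotically faster).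


-- ===== PORT A =====
-- One row of A's matrix `filas`: `filas.insert(i, [])` happens at index i = the current length of
-- `filas`, and every inner `row.insert(p, v)` also happens at p = the current length of the row,
-- so each row is built locally and appended; the inserts are kept literally (PySem.List.insert).
def pvRowA (Xn : List Int) (Hn : List Int) (i : Nat) : List Int :=
  let r : List Int := []
  -- for j in range(i): filas[i].insert(j, 0)
  let r := (List.range i).foldl (fun r (j : Nat) => PySem.List.insert r ((j : Int)) 0) r
  -- for k in range(len(Hn)): mult = Hn[k] * Xn[i]; filas[i].insert(k + i, mult)
  let r := (List.range Hn.length).foldl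
      (fun r (k : Nat) => PySem.List.insert r (((k : Int)) + ((i : Int))) (Hn.getD k 0 * Xn.getD i 0)) r
  -- for l in range(len(Xn) - i - 1): filas[i].append(0)
  let r := (List.range (Xn.length - i - 1)).foldl (fun r _ => r ++ [(0 : Int)]) r
  r

def convolucionPeriodica (Xn : List Int) (xn0 : Int) (Hn : List Int) (hn0 : Int) : List Int × Int :=
  -- for i in range(len(Xn)): build row i (see pvRowA)
  let filas := (List.range Xn.length).foldl (fun fs i => fs ++ [pvRowA Xn Hn i]) ([] : List (List Int))
  -- column sums; result.insert(i, suma) appends (i = current length of result)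
  let result := (List.range (filas.getD 0 []).length).foldl
      (fun res i => res ++ [(List.range filas.length).foldl
          (fun s j => s + (filas.getD j []).getD i 0) 0]) ([] : List Int)
  -- zero padding to a multiple of len(Xn)
  let result := if result.length % Xn.length ≠ 0 then
      (List.range (Xn.length - result.length % Xn.length)).foldl (fun r _ => r ++ [(0 : Int)]) result
    else result
  -- re-blocking: int(len(result)/len(Xn)) — exact since len(result) is a multiple of len(Xn)
  let nuevas := (List.range (result.length / Xn.length)).foldl
      (fun nf i => nf ++ [(List.range Xn.length).foldl
          (fun r j => r ++ [result.getD (i * Xn.length + j) 0]) ([] : List Int)]) ([] : List (List Int))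
  -- column sums of the stacked blocks
  let conv := (List.range (nuevas.getD 0 []).length).foldl
      (fun cv i => cv ++ [(List.range nuevas.length).foldl
          (fun s j => s + (nuevas.getD j []).getD i 0) 0]) ([] : List Int)
  (conv, PySem.Int.mod (xn0 + hn0) (Xn.length : Int))

-- ===== PORT B =====
-- convolucion[t] += v  (t is the always-in-range index (i+k) % N)
def pvAddAt (l : List Int) (t : Int) (v : Int) : List Int :=
  PySem.List.pySetD l t (PySem.List.pyGetD l t 0 + v)

def convolucionPeriodica_alt (Xn : List Int) (xn0 : Int) (Hn : List Int) (hn0 : Int) : List Int × Int :=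
  let N : Int := (Xn.length : Int)
  let conv := List.replicate Xn.length (0 : Int)
  let conv := (PySem.List.enumerate Xn 0).foldl (fun cv p =>
      (PySem.List.enumerate Hn 0).foldl (fun cv q =>
        pvAddAt cv (PySem.Int.mod (p.1 + q.1) N) (p.2 * q.2)) cv) conv
  (conv, PySem.Int.mod (xn0 + hn0) N)

-- ===== PRECONDITION & SPEC =====
-- Pre_ excludes exactly the inputs on which A raises: Xn = [] (IndexError on filas[0], % by 0),
-- and the corner len(Xn) = 1 with Hn = [] (the re-blocked matrix is empty: IndexError).
def Pre_convolucionPeriodica (Xn : List Int) (xn0 : Int) (Hn : List Int) (hn0 : Int) : Prop :=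
  Xn ≠ [] ∧ ¬(Xn.length = 1 ∧ Hn = [])
instance (Xn : List Int) (xn0 : Int) (Hn : List Int) (hn0 : Int) : Decidable (Pre_convolucionPeriodica Xn xn0 Hn hn0) := by unfold Pre_convolucionPeriodica; infer_instance

def pvWitness_convolucionPeriodica : List Int × Int × List Int × Int := ([1, 2], 0, [1], 0)

def Spec_convolucionPeriodica (Xn : List Int) (xn0 : Int) (Hn : List Int) (hn0 : Int) (out : List Int × Int) : Prop := out = convolucionPeriodica_alt Xn xn0 Hn hn0
instance (Xn : List Int) (xn0 : Int) (Hn : List Int) (hn0 : Int) (out : List Int × Int) : Decidable (Spec_convolucionPeriodica Xn xn0 Hn hn0 out) := by unfold Spec_convolucionPeriodica; infer_instance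

-- ===== CLAIM (what is proved, stated in full; the proofs are below) =====
def Claim_equal_convolucionPeriodica : Prop := ∀ (Xn : List Int) (xn0 : Int) (Hn : List Int) (hn0 : Int), Dom_convolucionPeriodica Xn xn0 Hn hn0 → Pre_convolucionPeriodica Xn xn0 Hn hn0 → Spec_convolucionPeriodica Xn xn0 Hn hn0 (convolucionPeriodica Xn xn0 Hn hn0)

-- ===== LEMMAS AND PROOFS =====

-- sum over range n (every column/row sum below has this shape)
def pvSL (n : Nat) (f : Nat → Int) : Int := ((List.range n).map f).sum

-- entry c of row i of A's matrix
def pvRowVal (Xn Hn : List Int) (i c : Nat) : Int :=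
  if i ≤ c ∧ c - i < Hn.length then Hn.getD (c - i) 0 * Xn.getD i 0 else 0

-- column sum c of A's matrix = linear-convolution coefficient c
def pvR (Xn Hn : List Int) (c : Nat) : Int := pvSL Xn.length (fun i => pvRowVal Xn Hn i c)

-- the common normal form: periodic-convolution coefficient j
def pvT (Xn Hn : List Int) (j : Nat) : Int :=
  pvSL Xn.length (fun i => pvSL Hn.length (fun k =>
    if (i + k) % Xn.length = j then Hn.getD k 0 * Xn.getD i 0 else 0))

theorem pvSL_eq_finset (n : Nat) (f : Nat → Int) : pvSL n f = ∑ i ∈ Finset.range n, f i := by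
  unfold pvSL; exact Int.neg_inj.mp rfl

theorem pvSL_comm (a b : Nat) (f : Nat → Nat → Int) :
    pvSL a (fun x => pvSL b (fun y => f x y)) = pvSL b (fun y => pvSL a (fun x => f x y)) := by
  simp only [pvSL_eq_finset]; exact Finset.sum_comm

theorem pvSL_succ (n : Nat) (f : Nat → Int) : pvSL (n + 1) f = pvSL n f + f n := by
  unfold pvSL; rw [List.range_succ]; simp

theorem pvSL_congr {n : Nat} {f g : Nat → Int} (h : ∀ t, t < n → f t = g t) : pvSL n f = pvSL n g := by
  unfold pvSL
  exact congrArg List.sum (List.map_congr_left (fun t ht => h t (List.mem_range.mp ht)))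

theorem pvSL_zero_of (n : Nat) (f : Nat → Int) (h : ∀ t, t < n → f t = 0) : pvSL n f = 0 := by
  rw [pvSL_congr h]; unfold pvSL; simp

theorem pvSL_add_split (a b : Nat) (f : Nat → Int) :
    pvSL (a + b) f = pvSL a f + pvSL b (fun t => f (a + t)) := by
  unfold pvSL; rw [List.range_add]; simp [Function.comp_def]

theorem pvSL_ite_eq (n j : Nat) (v : Nat → Int) :
    pvSL n (fun t => if t = j then v t else 0) = if j < n then v j else 0 := by
  rw [pvSL_eq_finset]
  simp [Finset.sum_ite_eq' (Finset.range n) j v]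

theorem pvSL_residue (N B j : Nat) (hj : j < N) (G : Nat → Int) :
    pvSL (N * B) (fun c => if c % N = j then G c else 0) = pvSL B (fun b => G (b * N + j)) := by
  induction B with
  | zero => simp [pvSL]
  | succ B ih =>
      rw [Nat.mul_succ, pvSL_add_split, ih, pvSL_succ]
      congr 1
      have : ∀ t, t < N → (if (N * B + t) % N = j then G (N * B + t) else 0)
          = (if t = j then G (N * B + t) else 0) := by
        intro t ht
        have h2 : (N * B + t) % N = t % N := Nat.mul_add_mod N B t
        rw [h2, Nat.mod_eq_of_lt ht]
      rw [pvSL_congr this, pvSL_ite_eq, if_pos hj, Nat.mul_comm N B]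

theorem pvSL_window (T i M : Nat) (F : Nat → Int)
    (hz : ∀ c, c < i ∨ i + M ≤ c → F c = 0) (hT : i + M ≤ T) :
    pvSL T F = pvSL M (fun k => F (i + k)) := by
  have hT' : T = i + (M + (T - i - M)) := by omega
  rw [hT', pvSL_add_split, pvSL_add_split]
  rw [pvSL_zero_of i F (fun t ht => hz t (Or.inl ht))]
  rw [pvSL_zero_of _ _ (fun t _ => hz (i + (M + t)) (Or.inr (by omega)))]
  ring

theorem pv_ins_zeros (n : Nat) :
    (List.range n).foldl (fun r (j : Nat) => PySem.List.insert r ((j : Int)) 0) ([] : List Int)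
      = List.replicate n 0 := by
  induction n with
  | zero => simp [List.replicate]
  | succ n ih =>
      rw [List.range_succ, List.foldl_append, ih]
      simp only [List.foldl_cons, List.foldl_nil]
      rw [PySem.List.insert_natCast _ n 0 (by simp), List.take_of_length_le (by simp),
        List.drop_of_length_le (by simp)]
      simp [List.replicate_succ']

theorem pv_ins_mults (v : Nat → Int) (i0 : Nat) (l0 : List Int) (hl : l0.length = i0) :
    ∀ m, (List.range m).foldl
        (fun r (k : Nat) => PySem.List.insert r (((k : Int)) + ((i0 : Int))) (v k)) l0
      = l0 ++ (List.range m).map v := by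
  intro m
  induction m with
  | zero => simp
  | succ m ih =>
      rw [List.range_succ, List.foldl_append, ih]
      simp only [List.foldl_cons, List.foldl_nil]
      have : ((m : Int)) + ((i0 : Int)) = ((m + i0 : Nat) : Int) := by push_cast; ring
      rw [this, PySem.List.insert_natCast _ _ _ (by simp [hl]; omega),
        List.take_of_length_le (by simp [hl]; omega), List.drop_of_length_le (by simp [hl]; omega)]
      simp

theorem pvRowA_eq (Xn Hn : List Int) (i : Nat) :
    pvRowA Xn Hn i =
      List.replicate i 0 ++ Hn.map (fun h => h * Xn.getD i 0) ++ List.replicate (Xn.length - i - 1) 0 := by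
  unfold pvRowA
  dsimp only
  rw [pv_ins_zeros, pv_ins_mults _ i _ (by simp),
    PySem.List.foldl_append_singleton_eq_map (fun _ => (0:Int))]
  congr 1
  · congr 1
    apply List.ext_getElem (by simp)
    intro k h1 h2
    simp only [List.getElem_map, List.getElem_range]
    rw [List.getD_eq_getElem Hn 0 (by simpa using h1)]
  · simp [List.map_const']

theorem pvRowA_length (Xn Hn : List Int) (i : Nat) (hi : i < Xn.length) :
    (pvRowA Xn Hn i).length = Hn.length + (Xn.length - 1) := by
  rw [pvRowA_eq]; simp; omega

theorem pvRowA_getD (Xn Hn : List Int) (i c : Nat) :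
    (pvRowA Xn Hn i).getD c 0 = pvRowVal Xn Hn i c := by
  rw [pvRowA_eq]
  unfold pvRowVal
  rcases Nat.lt_or_ge c i with hc | hc
  · rw [List.getD_append _ _ _ _ (by simp; omega)]
    rw [List.getD_append _ _ _ _ (by simp; omega)]
    simp [List.getD_eq_getElem?_getD, hc]
  · rw [List.append_assoc, List.getD_append_right _ _ _ _ (by simpa using hc)]
    simp only [List.length_replicate]
    rcases Nat.lt_or_ge (c - i) Hn.length with hk | hk
    · rw [List.getD_append _ _ _ _ (by simpa using hk)]
      rw [List.getD_eq_getElem _ _ (by simpa using hk), List.getElem_map]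
      rw [if_pos ⟨hc, hk⟩, List.getD_eq_getElem Hn 0 hk]
    · rw [List.getD_append_right _ _ _ _ (by simpa using hk)]
      simp [List.getD_eq_getElem?_getD]
      intro h; omega

theorem pvR_zero_of_ge (Xn Hn : List Int) (c : Nat) (hc : Hn.length + (Xn.length - 1) ≤ c) :
    pvR Xn Hn c = 0 := by
  apply pvSL_zero_of
  intro i hi
  unfold pvRowVal
  split_ifs with h
  · omega
  · rfl

theorem pv_tail (Xn Hn : List Int) (resultP : List Int)
    (hN : 0 < Xn.length) (hdvd : Xn.length ∣ resultP.length) (hpos : 0 < resultP.length)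
    (hge : Hn.length + (Xn.length - 1) ≤ resultP.length)
    (hgetD : ∀ c, resultP.getD c 0 = pvR Xn Hn c) :
    (let nuevas := (List.range (resultP.length / Xn.length)).foldl
        (fun nf i => nf ++ [(List.range Xn.length).foldl
            (fun r j => r ++ [resultP.getD (i * Xn.length + j) 0]) ([] : List Int)]) ([] : List (List Int))
     (List.range (nuevas.getD 0 []).length).foldl
        (fun cv i => cv ++ [(List.range nuevas.length).foldl
            (fun s j => s + (nuevas.getD j []).getD i 0) 0]) ([] : List Int))
      = (List.range Xn.length).map (pvT Xn Hn) := by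
  set N := Xn.length with hNdef
  set M := Hn.length with hMdef
  set B := resultP.length / N with hBdef
  have hLB : resultP.length = N * B := by
    rw [hBdef, Nat.mul_comm _ (resultP.length / N), Nat.div_mul_cancel hdvd]
  have hB : 0 < B := by
    rcases Nat.eq_zero_or_pos B with h | h
    · rw [h, Nat.mul_zero] at hLB; omega
    · exact h
  -- the blocks
  have hrow : ∀ b : Nat, (List.range N).foldl
      (fun r j => r ++ [resultP.getD (b * N + j) 0]) ([] : List Int)
      = (List.range N).map (fun j => resultP.getD (b * N + j) 0) := by
    intro b
    rw [PySem.List.foldl_append_singleton_eq_map (fun j => resultP.getD (b * N + j) 0)]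
    simp
  have hnuevas : (List.range B).foldl
      (fun nf i => nf ++ [(List.range N).foldl
          (fun r j => r ++ [resultP.getD (i * N + j) 0]) ([] : List Int)]) ([] : List (List Int))
      = (List.range B).map (fun b => (List.range N).map (fun j => resultP.getD (b * N + j) 0)) := by
    rw [PySem.List.foldl_append_singleton_eq_map
      (fun b => (List.range N).foldl (fun r j => r ++ [resultP.getD (b * N + j) 0]) ([] : List Int))]
    simp only [List.nil_append]
    exact List.map_congr_left (fun b _ => hrow b)
  dsimp only
  rw [hnuevas]
  have hn0 : ((List.range B).map (fun b => (List.range N).map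
      (fun j => resultP.getD (b * N + j) 0))).getD 0 [] = (List.range N).map (fun j => resultP.getD (0 * N + j) 0) :=
    PySem.List.getD_map_range _ B 0 [] hB
  rw [hn0]
  rw [PySem.List.foldl_append_singleton_eq_map
    (fun i => (List.range ((List.range B).map (fun b => (List.range N).map (fun j => resultP.getD (b * N + j) 0))).length).foldl
        (fun s j => s + (((List.range B).map (fun b => (List.range N).map (fun j => resultP.getD (b * N + j) 0))).getD j []).getD i 0) 0)]
  simp only [List.nil_append, List.length_map, List.length_range]
  apply List.ext_getElem (by simp)
  intro t h1 h2
  simp only [List.getElem_map, List.getElem_range]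
  have ht : t < N := by simpa using h1
  rw [PySem.List.foldl_add, zero_add]
  have step1 : ((List.range B).map (fun j =>
      (((List.range B).map (fun b => (List.range N).map (fun jj => resultP.getD (b * N + jj) 0))).getD j []).getD t 0)).sum
      = pvSL B (fun b => pvR Xn Hn (b * N + t)) := by
    apply pvSL_congr
    intro b hb
    rw [PySem.List.getD_map_range _ B b [] hb, PySem.List.getD_map_range _ N t 0 ht, hgetD]
  rw [step1]
  -- fold the residue class back into one long sum, swap, and reduce each window
  rw [← pvSL_residue N B t ht (pvR Xn Hn)]
  have step2 : pvSL (N * B) (fun c => if c % N = t then pvR Xn Hn c else 0)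
      = pvSL N (fun i => pvSL (N * B) (fun c => if c % N = t then pvRowVal Xn Hn i c else 0)) := by
    rw [pvSL_comm]
    apply pvSL_congr
    intro c _
    by_cases hc : c % N = t
    · simp only [hc, if_true]
      rfl
    · simp only [hc, if_false]
      exact (pvSL_zero_of _ _ (fun _ _ => by simp)).symm
  rw [step2]
  apply pvSL_congr
  intro i hi
  rw [pvSL_window (N * B) i M _ ?_ (by omega)]
  · apply pvSL_congr
    intro k hk
    have h1 : (i + k) - i = k := by omega
    have hval : pvRowVal Xn Hn i (i + k) = Hn.getD k 0 * Xn.getD i 0 := by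
      unfold pvRowVal; rw [h1]; exact if_pos ⟨Nat.le_add_right i k, hk⟩
    rw [hval]
  · intro c hc
    have hval : pvRowVal Xn Hn i c = 0 := by
      unfold pvRowVal; rw [if_neg (by omega)]
    rw [hval]
    simp

theorem convA_fst (Xn Hn : List Int) (xn0 hn0 : Int)
    (hPre : Pre_convolucionPeriodica Xn xn0 Hn hn0) :
    (convolucionPeriodica Xn xn0 Hn hn0).1 = (List.range Xn.length).map (pvT Xn Hn) := by
  obtain ⟨hne, hcor⟩ := hPre
  have hN : 0 < Xn.length := List.length_pos_iff.mpr hne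
  have hL0 : 0 < Hn.length + (Xn.length - 1) := by
    rcases Nat.eq_zero_or_pos Hn.length with h | h
    · have : Hn = [] := List.eq_nil_of_length_eq_zero h
      have : Xn.length ≠ 1 := fun h1 => hcor ⟨h1, this⟩
      omega
    · omega
  unfold convolucionPeriodica
  dsimp only
  have hfilas : (List.range Xn.length).foldl (fun fs i => fs ++ [pvRowA Xn Hn i]) ([] : List (List Int))
      = (List.range Xn.length).map (pvRowA Xn Hn) := by
    rw [PySem.List.foldl_append_singleton_eq_map (pvRowA Xn Hn)]; simp
  rw [hfilas]
  have hget0 : ((List.range Xn.length).map (pvRowA Xn Hn)).getD 0 [] = pvRowA Xn Hn 0 :=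
    PySem.List.getD_map_range _ _ 0 [] hN
  rw [hget0, pvRowA_length Xn Hn 0 hN]
  simp only [List.length_map, List.length_range]
  have hcol : ∀ c : Nat, (List.range Xn.length).foldl
      (fun s j => s + (((List.range Xn.length).map (pvRowA Xn Hn)).getD j []).getD c 0) 0
      = pvR Xn Hn c := by
    intro c
    rw [PySem.List.foldl_add, zero_add]
    apply pvSL_congr
    intro j hj
    rw [PySem.List.getD_map_range _ _ j [] hj, pvRowA_getD]
  rw [PySem.List.foldl_append_singleton_eq_map
    (fun c => (List.range Xn.length).foldl
      (fun s j => s + (((List.range Xn.length).map (pvRowA Xn Hn)).getD j []).getD c 0) 0)]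
  simp only [List.nil_append]
  rw [List.map_congr_left (fun c (_ : c ∈ List.range (Hn.length + (Xn.length - 1))) => hcol c)]
  simp only [List.length_map, List.length_range]
  by_cases hmod : (Hn.length + (Xn.length - 1)) % Xn.length ≠ 0
  · rw [if_pos hmod]
    have hpad : (List.range (Xn.length - (Hn.length + (Xn.length - 1)) % Xn.length)).foldl
        (fun r _ => r ++ [(0 : Int)]) ((List.range (Hn.length + (Xn.length - 1))).map (pvR Xn Hn))
        = (List.range (Hn.length + (Xn.length - 1))).map (pvR Xn Hn)
          ++ List.replicate (Xn.length - (Hn.length + (Xn.length - 1)) % Xn.length) 0 := by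
      rw [PySem.List.foldl_append_singleton_eq_map (fun _ => (0 : Int))]
      simp [List.map_const']
    rw [hpad]
    have hd := Nat.div_add_mod (Hn.length + (Xn.length - 1)) Xn.length
    apply pv_tail Xn Hn _ hN
    · refine ⟨(Hn.length + (Xn.length - 1)) / Xn.length + 1, ?_⟩
      simp only [List.length_append, List.length_map, List.length_range, List.length_replicate]
      have hlt := Nat.mod_lt (Hn.length + (Xn.length - 1)) hN
      rw [Nat.mul_succ]
      omega
    · simp only [List.length_append, List.length_map, List.length_range, List.length_replicate]
      omega
    · simp only [List.length_append, List.length_map, List.length_range, List.length_replicate]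
      omega
    · intro c
      rcases Nat.lt_or_ge c (Hn.length + (Xn.length - 1)) with hc | hc
      · rw [List.getD_append _ _ _ _ (by simpa using hc), PySem.List.getD_map_range _ _ c 0 hc]
      · rw [List.getD_append_right _ _ _ _ (by simpa using hc)]
        rw [pvR_zero_of_ge Xn Hn c hc]
        simp [List.getD_eq_getElem?_getD]
  · rw [if_neg hmod]
    push Not at hmod
    apply pv_tail Xn Hn _ hN
    · refine ⟨(Hn.length + (Xn.length - 1)) / Xn.length, ?_⟩
      have hd := Nat.div_add_mod (Hn.length + (Xn.length - 1)) Xn.length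
      simp only [List.length_map, List.length_range]
      omega
    · simpa using hL0
    · simp
    · intro c
      rcases Nat.lt_or_ge c (Hn.length + (Xn.length - 1)) with hc | hc
      · rw [PySem.List.getD_map_range _ _ c 0 hc]
      · rw [pvR_zero_of_ge Xn Hn c hc, List.getD_eq_getElem?_getD,
          List.getElem?_eq_none (by simpa using hc)]
        rfl

theorem pv_fold_addAt_len (ps : List (Int × Int)) (acc : List Int) :
    (ps.foldl (fun a p => pvAddAt a p.1 p.2) acc).length = acc.length := by
  induction ps generalizing acc with
  | nil => rfl
  | cons p ps ih => simp only [List.foldl_cons]; rw [ih]; simp [pvAddAt, PySem.List.length_pySetD]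

theorem pv_addAt_getD (acc : List Int) (n : Nat) (v : Int) (j : Nat) (hn : n < acc.length) :
    (pvAddAt acc (n : Int) v).getD j 0 = acc.getD j 0 + (if (n : Int) = (j : Int) then v else 0) := by
  unfold pvAddAt
  rw [PySem.List.pySetD_natCast, PySem.List.pyGetD_natCast]
  simp only [List.getD_eq_getElem?_getD, List.getElem?_set]
  by_cases h : n = j
  · subst h
    simp [hn]
  · rw [if_neg h, if_neg (by exact_mod_cast h)]
    simp

theorem pv_fold_addAt_getD (ps : List (Int × Int)) :
    ∀ (acc : List Int) (j : Nat), j < acc.length →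
    (∀ p ∈ ps, 0 ≤ p.1 ∧ p.1 < (acc.length : Int)) →
    (ps.foldl (fun a p => pvAddAt a p.1 p.2) acc).getD j 0
      = acc.getD j 0 + (ps.map (fun p => if p.1 = (j : Int) then p.2 else 0)).sum := by
  induction ps with
  | nil => intro acc j _ _; simp
  | cons p ps ih =>
      intro acc j hj hb
      have hp := hb p List.mem_cons_self
      have hn : p.1 = ((p.1.toNat : Nat) : Int) := by omega
      have hlt : p.1.toNat < acc.length := by omega
      simp only [List.foldl_cons, List.map_cons, List.sum_cons]
      rw [ih (pvAddAt acc p.1 p.2) j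
        (by unfold pvAddAt; rw [PySem.List.length_pySetD]; exact hj)
        (by intro q hq
            have := hb q (List.mem_cons_of_mem p hq)
            unfold pvAddAt; rw [PySem.List.length_pySetD]; exact this)]
      rw [hn, pv_addAt_getD acc p.1.toNat p.2 j hlt]
      ring

theorem pv_sum_flatMap {α : Type} (l : List α) (g : α → List Int) :
    (l.flatMap g).sum = (l.map (fun x => (g x).sum)).sum := by
  induction l with
  | nil => simp
  | cons x xs ih => simp [List.flatMap_cons, ih]

theorem convB_fst (Xn Hn : List Int) (xn0 hn0 : Int) (hne : Xn ≠ []) :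
    (convolucionPeriodica_alt Xn xn0 Hn hn0).1 = (List.range Xn.length).map (pvT Xn Hn) := by
  have hN : 0 < Xn.length := List.length_pos_iff.mpr hne
  unfold convolucionPeriodica_alt
  dsimp only
  set U : List (Int × Int) := (PySem.List.enumerate Xn 0).flatMap (fun p =>
      (PySem.List.enumerate Hn 0).map (fun q =>
        (PySem.Int.mod (p.1 + q.1) ((Xn.length : Int)), p.2 * q.2))) with hUdef
  have hfold : (PySem.List.enumerate Xn 0).foldl (fun cv p =>
      (PySem.List.enumerate Hn 0).foldl (fun cv q =>
        pvAddAt cv (PySem.Int.mod (p.1 + q.1) ((Xn.length : Int))) (p.2 * q.2)) cv)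
        (List.replicate Xn.length (0 : Int))
      = U.foldl (fun a p => pvAddAt a p.1 p.2) (List.replicate Xn.length (0 : Int)) := by
    rw [hUdef, List.foldl_flatMap]
    simp only [List.foldl_map]
  rw [hfold]
  have hbounds : ∀ p ∈ U, 0 ≤ p.1 ∧ p.1 < ((List.replicate Xn.length (0 : Int)).length : Int) := by
    intro p hp
    rw [hUdef] at hp
    obtain ⟨a, _, hm⟩ := List.mem_flatMap.mp hp
    obtain ⟨q, _, rfl⟩ := List.mem_map.mp hm
    have hpos : (0 : Int) < (Xn.length : Int) := by exact_mod_cast hN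
    simp only [List.length_replicate]
    exact ⟨PySem.Int.mod_nonneg _ hpos, PySem.Int.mod_lt _ hpos⟩
  apply List.ext_getElem
  · rw [pv_fold_addAt_len]; simp
  · intro t h1 h2
    have hlen : (U.foldl (fun a p => pvAddAt a p.1 p.2) (List.replicate Xn.length (0:Int))).length
        = Xn.length := by rw [pv_fold_addAt_len]; simp
    have ht : t < Xn.length := by rwa [hlen] at h1
    rw [← List.getD_eq_getElem _ 0 h1, ← List.getD_eq_getElem _ 0 h2,
      PySem.List.getD_map_range _ _ t 0 ht]
    rw [pv_fold_addAt_getD U _ t (by simpa using ht) hbounds]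
    have hz : (List.replicate Xn.length (0:Int)).getD t 0 = 0 := by
      simp [List.getD_eq_getElem?_getD, ht]
    rw [hz, zero_add]
    -- now compute the sum over U
    rw [hUdef, List.map_flatMap, pv_sum_flatMap]
    rw [PySem.List.enumerate_eq_map_pyRange Xn 0]
    show ((PySem.List.pyRange 0 ((Xn.length : Int))).map _ |>.map _).sum = _
    rw [PySem.List.pyRange_zero_natCast, List.map_map, List.map_map]
    unfold pvT
    apply pvSL_congr
    intro i hi
    simp only [Function.comp]
    rw [List.map_map, PySem.List.enumerate_eq_map_pyRange Hn 0]
    show ((PySem.List.pyRange 0 ((Hn.length : Int))).map _ |>.map _).sum = _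
    rw [PySem.List.pyRange_zero_natCast, List.map_map, List.map_map]
    apply pvSL_congr
    intro k hk
    simp only [Function.comp, PySem.List.pyGetD_natCast]
    have hcast : ((i : Int) + (k : Int)) = (((i + k : Nat)) : Int) := by push_cast; ring
    rw [hcast, PySem.Int.mod_natCast]
    by_cases h : (i + k) % Xn.length = t
    · rw [if_pos (by exact_mod_cast h), if_pos h]; ring
    · rw [if_neg (by exact_mod_cast h), if_neg h]

-- ===== VERDICT (by name: the statement is the Claim_ definition above) =====
theorem convolucionPeriodica_spec : Claim_equal_convolucionPeriodica := by
  intro Xn xn0 Hn hn0 _ hPre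
  unfold Spec_convolucionPeriodica
  refine Prod.ext ?_ rfl
  rw [convA_fst Xn Hn xn0 hn0 hPre, convB_fst Xn Hn xn0 hn0 hPre.1]
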